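-- pv_equiv track=rewrite | github.com/ourovoros-io/illu-rs | scripts/distill_axioms.py | chunk_markdown
-- ===== SOURCE A (Python) =====
-- def chunk_markdown(content, max_length=6000):
--     """
--     Split markdown into chunks by heading, attempting to keep them under max_length characters.
--     """
--     chunks = []
--     current_chunk = []
--     current_length = 0
--
--     lines = content.split('\n')
--     for line in lines:
--         if line.startswith('## ') and current_length > 1000:
--             chunks.append('\n'.join(current_chunk))
--             current_chunk = []
--             current_length = 0
--
--         current_chunk.append(line)
--         current_length += len(line) + 1
--
--     if current_chunk:
--         chunks.append('\n'.join(current_chunk))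
--
--     return chunks
-- ===== SOURCE B (Python) =====
-- def chunk_markdown(content, max_length=6000):
--     """
--     Split markdown into chunks by heading, attempting to keep them under max_length characters.
--     """
--     # Phase 1: segment the lines into sections; every '## ' heading (except a
--     # heading on the very first line) starts a new section.
--     lines = content.split('\n')
--     sections = []
--     cur_sec = [lines[0]]
--     for line in lines[1:]:
--         if line.startswith('## '):
--             sections.append(cur_sec)
--             cur_sec = [line]
--         else:
--             cur_sec.append(line)
--     sections.append(cur_sec)
--
--     # Phase 2: pack sections into chunks, flushing before a section only when
--     # the accumulated length exceeds 1000.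
--     chunks = []
--     cur = list(sections[0])
--     cur_len = sum(len(l) + 1 for l in sections[0])
--     for sec in sections[1:]:
--         if cur_len > 1000:
--             chunks.append('\n'.join(cur))
--             cur = []
--             cur_len = 0
--         cur.extend(sec)
--         cur_len += sum(len(l) + 1 for l in sec)
--     chunks.append('\n'.join(cur))
--     return chunks
-- ===== Notes on version B (the rewrite author's own statement) =====
-- stated objective: alternative
-- what changed: A's single interleaved loop (flush-check per line while accumulating) is replaced by a two-phase decomposition: first segment the lines into sections at '## ' headings, then pack whole sections into chunks with the flush check only at section boundaries.
import Mathlib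
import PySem

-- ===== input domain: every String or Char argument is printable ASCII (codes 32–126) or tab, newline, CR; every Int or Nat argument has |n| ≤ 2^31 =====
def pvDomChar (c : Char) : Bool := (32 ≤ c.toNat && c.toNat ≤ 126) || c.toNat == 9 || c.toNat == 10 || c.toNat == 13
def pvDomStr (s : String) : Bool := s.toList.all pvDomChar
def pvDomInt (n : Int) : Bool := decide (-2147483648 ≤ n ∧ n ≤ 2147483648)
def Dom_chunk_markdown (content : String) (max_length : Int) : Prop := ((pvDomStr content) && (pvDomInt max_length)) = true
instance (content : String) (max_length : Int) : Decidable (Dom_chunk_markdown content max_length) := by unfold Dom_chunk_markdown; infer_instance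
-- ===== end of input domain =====

-- B replaces A's single interleaved loop by two passes — segment the lines at '## ' headings,
-- then pack whole sections into chunks — a clearer decomposition with the same cost (objective: alternative).

-- ===== PORT A =====
-- one iteration of A's for-loop over lines; state = (chunks, current_chunk, current_length)
def pvAStep (st : List String × List String × Int) (line : String) : List String × List String × Int :=
  let st1 := if PySem.Str.startswith line "## " && decide (st.2.2 > 1000)
    then (st.1 ++ [PySem.Str.join "\n" st.2.1], ([] : List String), (0 : Int))
    else st
  (st1.1, st1.2.1 ++ [line], st1.2.2 + (PySem.Str.len line + 1))

def chunk_markdown (content : String) (max_length : Int) : List String :=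
  let lines := (PySem.Str.split? content "\n").getD []   -- sep "\n" ≠ "", so split? is always `some`
  let st := lines.foldl pvAStep ([], [], 0)
  if st.2.1 ≠ [] then st.1 ++ [PySem.Str.join "\n" st.2.1] else st.1

-- ===== PORT B =====
-- Source B: sum(len(l) + 1 for l in sec)
def pvSumLen (sec : List String) : Int := (sec.map (fun l => PySem.Str.len l + 1)).sum

-- phase 1 loop body: state = (sections, cur_sec)
def pvSegStep (st : List (List String) × List String) (line : String) : List (List String) × List String :=
  if PySem.Str.startswith line "## " then (st.1 ++ [st.2], [line]) else (st.1, st.2 ++ [line])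

-- phase 2 loop body: state = (chunks, cur, cur_len)
def pvPackStep (st : List String × List String × Int) (sec : List String) : List String × List String × Int :=
  let st1 := if st.2.2 > 1000
    then (st.1 ++ [PySem.Str.join "\n" st.2.1], ([] : List String), (0 : Int))
    else st
  (st1.1, st1.2.1 ++ sec, st1.2.2 + pvSumLen sec)

def chunk_markdown_alt (content : String) (max_length : Int) : List String :=
  let lines := (PySem.Str.split? content "\n").getD []   -- sep "\n" ≠ "", so split? is always `some`
  match lines with
  | [] => []   -- unreachable: str.split never returns an empty list
  | first :: rest =>
    let seg := rest.foldl pvSegStep ([], [first])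
    match seg.1 ++ [seg.2] with   -- sections
    | [] => []   -- unreachable: the list ends with [seg.2]
    | s0 :: tailSecs =>
      let st := tailSecs.foldl pvPackStep ([], s0, pvSumLen s0)
      st.1 ++ [PySem.Str.join "\n" st.2.1]

-- ===== PRECONDITION & SPEC =====
def Spec_chunk_markdown (content : String) (max_length : Int) (out : List String) : Prop := out = chunk_markdown_alt content max_length
instance (content : String) (max_length : Int) (out : List String) : Decidable (Spec_chunk_markdown content max_length out) := by unfold Spec_chunk_markdown; infer_instance

-- ===== CLAIM (what is proved, stated in full; the proofs are below) =====
def Claim_equal_chunk_markdown : Prop := ∀ (content : String) (max_length : Int), Dom_chunk_markdown content max_length → Spec_chunk_markdown content max_length (chunk_markdown content max_length)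

-- ===== LEMMAS AND PROOFS =====

-- s.split('\n') never returns an empty list
theorem pvSplitOnGo_ne_nil (fuel : Nat) : ∀ (sep l cur : List Char) acc, PySem.Chars.splitOn.go sep fuel l cur acc ≠ [] := by
  induction fuel with
  | zero => intro sep l cur acc; simp [PySem.Chars.splitOn.go]
  | succ n ih =>
    intro sep l cur acc
    cases l with
    | nil => simp [PySem.Chars.splitOn.go]
    | cons c rest =>
      rw [PySem.Chars.splitOn.go]
      split <;> apply ih

theorem pvLines_ne_nil (content : String) : (PySem.Str.split? content "\n").getD [] ≠ [] := by
  have h := PySem.Str.split?_map content "\n"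
  have hc : PySem.Chars.split? content.toList "\n".toList
      = some (PySem.Chars.splitOn content.toList "\n".toList) := by
    simp [PySem.Chars.split?]
  rw [hc] at h
  cases hys : PySem.Str.split? content "\n" with
  | none => rw [hys] at h; simp at h
  | some ys =>
    rw [hys] at h
    simp only [Option.map_some, Option.some.injEq] at h
    have hne : PySem.Chars.splitOn content.toList "\n".toList ≠ [] := by
      unfold PySem.Chars.splitOn; apply pvSplitOnGo_ne_nil
    intro hcon
    simp only [Option.getD_some] at hcon
    subst hcon
    simp at h
    exact hne h

-- the head of a dropWhile result falsifies the predicate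
theorem pvDropWhile_head_false {α : Type} (p : α → Bool) : ∀ (ls : List α) (h : α) (t : List α), ls.dropWhile p = h :: t → p h = false := by
  intro ls
  induction ls with
  | nil => intro h t hh; simp [List.dropWhile] at hh
  | cons a rest ih =>
    intro h t hh
    rw [List.dropWhile_cons] at hh
    by_cases hp : p a = true
    · rw [if_pos hp] at hh; exact ih h t hh
    · rw [if_neg hp] at hh
      cases hh; simpa using hp

theorem pvSumLen_cons (l : String) (ls : List String) : pvSumLen (l :: ls) = (PySem.Str.len l + 1) + pvSumLen ls := by
  simp [pvSumLen]

-- A's loop over a run of non-heading lines just appends them and adds their lengths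
theorem pvNoHeadRun : ∀ (ls : List String) (st : List String × List String × Int),
    (∀ l ∈ ls, PySem.Str.startswith l "## " = false) →
    ls.foldl pvAStep st = (st.1, st.2.1 ++ ls, st.2.2 + pvSumLen ls) := by
  intro ls
  induction ls with
  | nil => intro st _; simp [pvSumLen]
  | cons l rest ih =>
    intro st hno
    have hl : PySem.Str.startswith l "## " = false := hno l (by simp)
    have hrest : ∀ x ∈ rest, PySem.Str.startswith x "## " = false := fun x hx => hno x (by simp [hx])
    have hstep : pvAStep st l = (st.1, st.2.1 ++ [l], st.2.2 + (PySem.Str.len l + 1)) := by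
      simp only [pvAStep, hl, Bool.false_and]
      rw [if_neg (by simp)]
    simp only [List.foldl_cons]
    rw [hstep, ih _ hrest, pvSumLen_cons]
    refine Prod.ext rfl (Prod.ext ?_ ?_)
    · simp
    · simp only []; ring

-- proof-side characterisation of phase 1: hSecs cuts a heading-led tail into sections
def pvHSecs : List String → List (List String)
  | [] => []
  | l :: rest =>
      (l :: rest.takeWhile (fun x => !PySem.Str.startswith x "## ")) ::
      pvHSecs (rest.dropWhile (fun x => !PySem.Str.startswith x "## "))
termination_by ls => ls.length
decreasing_by
  simp only [List.length_cons]
  have := List.length_dropWhile_le (fun x => !PySem.Str.startswith x "## ") rest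
  omega

def pvSegAux (cur : List String) : List String → List (List String)
  | [] => [cur]
  | l :: rest => if PySem.Str.startswith l "## " then cur :: pvSegAux [l] rest else pvSegAux (cur ++ [l]) rest

theorem pvSegAux_eq : ∀ (ls cur : List String),
    pvSegAux cur ls
      = (cur ++ ls.takeWhile (fun x => !PySem.Str.startswith x "## "))
        :: pvHSecs (ls.dropWhile (fun x => !PySem.Str.startswith x "## ")) := by
  intro ls
  induction ls with
  | nil => intro cur; simp [pvSegAux, pvHSecs]
  | cons l rest ih =>
    intro cur
    by_cases hl : PySem.Str.startswith l "## " = true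
    · simp only [pvSegAux, if_pos hl, ih]
      rw [List.takeWhile_cons, List.dropWhile_cons]
      simp only [hl, Bool.not_true, Bool.false_eq_true, if_false]
      rw [show pvHSecs (l :: rest)
            = (l :: rest.takeWhile (fun x => !PySem.Str.startswith x "## "))
              :: pvHSecs (rest.dropWhile (fun x => !PySem.Str.startswith x "## ")) from by rw [pvHSecs]]
      simp
    · have hl' : PySem.Str.startswith l "## " = false := by
        simpa using hl
      simp only [pvSegAux, if_neg hl, ih]
      rw [List.takeWhile_cons, List.dropWhile_cons]
      simp only [hl', Bool.not_false, if_true]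
      simp

theorem pvSegFold_concat : ∀ (ls : List String) (secs : List (List String)) (cur : List String),
    (ls.foldl pvSegStep (secs, cur)).1 ++ [(ls.foldl pvSegStep (secs, cur)).2] = secs ++ pvSegAux cur ls := by
  intro ls
  induction ls with
  | nil => intro secs cur; simp [pvSegAux]
  | cons l rest ih =>
    intro secs cur
    by_cases hl : PySem.Str.startswith l "## " = true
    · simp only [List.foldl_cons, pvSegStep, if_pos hl, pvSegAux]
      rw [ih]
      simp
    · simp only [List.foldl_cons, pvSegStep, if_neg hl, pvSegAux]
      rw [ih]

-- the core equivalence: A's loop over a heading-led tail equals B's packing loop over its sections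
theorem pvMain : ∀ (n : Nat) (ls : List String), ls.length ≤ n →
    (∀ h t, ls = h :: t → PySem.Str.startswith h "## " = true) →
    ∀ st : List String × List String × Int,
      ls.foldl pvAStep st = (pvHSecs ls).foldl pvPackStep st := by
  intro n
  induction n with
  | zero =>
    intro ls hlen _ st
    have : ls = [] := List.length_eq_zero_iff.mp (Nat.le_zero.mp hlen)
    subst this; simp [pvHSecs]
  | succ n ih =>
    intro ls hlen hhead st
    cases ls with
    | nil => simp [pvHSecs]
    | cons h t =>
      have hh : PySem.Str.startswith h "## " = true := hhead h t rfl
      -- split the tail at the next heading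
      set p := fun x => !PySem.Str.startswith x "## " with hp
      have hsplit : t = t.takeWhile p ++ t.dropWhile p := (List.takeWhile_append_dropWhile).symm
      have hrun : ∀ l ∈ t.takeWhile p, PySem.Str.startswith l "## " = false := by
        intro l hl
        have := List.mem_takeWhile_imp hl
        simpa [hp] using this
      -- A over the head line and its non-heading run equals one packing step on the section
      have hA : (t.takeWhile p).foldl pvAStep (pvAStep st h) = pvPackStep st (h :: t.takeWhile p) := by
        rw [pvNoHeadRun _ _ hrun]
        by_cases hc : st.2.2 > 1000
        · simp only [pvAStep, pvPackStep, hh, Bool.true_and]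
          rw [if_pos (by exact decide_eq_true hc), if_pos hc, pvSumLen_cons]
          refine Prod.ext rfl (Prod.ext ?_ ?_)
          · simp
          · simp only []; ring
        · simp only [pvAStep, pvPackStep, hh, Bool.true_and]
          rw [if_neg (by simpa using hc), if_neg hc, pvSumLen_cons]
          refine Prod.ext rfl (Prod.ext ?_ ?_)
          · simp
          · simp only []; ring
      -- LHS: peel the head, split the tail at the next heading
      rw [List.foldl_cons]
      conv_lhs => rw [hsplit]
      rw [List.foldl_append, hA]
      -- RHS: peel the first section
      rw [show pvHSecs (h :: t) = (h :: t.takeWhile p) :: pvHSecs (t.dropWhile p) from by rw [pvHSecs]]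
      rw [List.foldl_cons]
      -- recurse on the rest
      have hlen' : (t.dropWhile p).length ≤ n := by
        have h1 := List.length_dropWhile_le p t
        simp only [List.length_cons] at hlen
        omega
      have hhead' : ∀ h' t', t.dropWhile p = h' :: t' → PySem.Str.startswith h' "## " = true := by
        intro h' t' heq
        have := pvDropWhile_head_false p t h' t' heq
        simpa [hp] using this
      exact ih _ hlen' hhead' _

-- the packing loop keeps cur non-empty when every section is non-empty
theorem pvPack_ne : ∀ (secs : List (List String)) (st : List String × List String × Int),
    st.2.1 ≠ [] → (∀ s ∈ secs, s ≠ []) → (secs.foldl pvPackStep st).2.1 ≠ [] := by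
  intro secs
  induction secs with
  | nil => intro st h _; simpa using h
  | cons s rest ih =>
    intro st h hall
    simp only [List.foldl_cons]
    apply ih
    · simp only [pvPackStep]
      have hs : s ≠ [] := hall s (by simp)
      intro hcon
      exact hs (List.append_eq_nil_iff.mp hcon).2
    · intro x hx; exact hall x (by simp [hx])

-- every section produced by pvHSecs is non-empty
theorem pvHSecs_ne : ∀ (n : Nat) (ls : List String), ls.length ≤ n → ∀ s ∈ pvHSecs ls, s ≠ [] := by
  intro n
  induction n with
  | zero =>
    intro ls hlen
    have : ls = [] := List.length_eq_zero_iff.mp (Nat.le_zero.mp hlen)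
    subst this; simp [pvHSecs]
  | succ n ih =>
    intro ls hlen s hs
    cases ls with
    | nil => simp [pvHSecs] at hs
    | cons h t =>
      rw [pvHSecs] at hs
      rcases List.mem_cons.mp hs with h1 | h1
      · subst h1; simp
      · have hlen' : (t.dropWhile (fun x => !PySem.Str.startswith x "## ")).length ≤ n := by
          have := List.length_dropWhile_le (fun x => !PySem.Str.startswith x "## ") t
          simp only [List.length_cons] at hlen
          omega
        exact ih _ hlen' s h1

-- ===== VERDICT (by name: the statement is the Claim_ definition above) =====
theorem chunk_markdown_spec : Claim_equal_chunk_markdown := by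
  intro content max_length _
  unfold Spec_chunk_markdown chunk_markdown chunk_markdown_alt
  have hne := pvLines_ne_nil content
  cases hl : (PySem.Str.split? content "\n").getD [] with
  | nil => exact absurd hl hne
  | cons first rest =>
    simp only []
    set p := fun x => !PySem.Str.startswith x "## " with hp
    -- B's sections
    have hsec := pvSegFold_concat rest [] [first]
    rw [pvSegAux_eq] at hsec
    simp only [List.nil_append, List.singleton_append] at hsec
    rw [hsec]
    -- A's fold: first line, then run, then heading-led tail
    have hsplit : rest = rest.takeWhile p ++ rest.dropWhile p := (List.takeWhile_append_dropWhile).symm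
    have hrun : ∀ l ∈ rest.takeWhile p, PySem.Str.startswith l "## " = false := by
      intro l hl'
      have := List.mem_takeWhile_imp hl'
      simpa [hp] using this
    rw [List.foldl_cons]
    conv_lhs => rw [hsplit]
    rw [List.foldl_append, pvNoHeadRun _ _ hrun]
    have hstep0 : pvAStep ([], [], 0) first = ([], [first], PySem.Str.len first + 1) := by
      simp [pvAStep]
    rw [hstep0]
    have hhead' : ∀ h' t', rest.dropWhile p = h' :: t' → PySem.Str.startswith h' "## " = true := by
      intro h' t' heq
      have := pvDropWhile_head_false p rest h' t' heq
      simpa [hp] using this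
    rw [pvMain (rest.dropWhile p).length _ le_rfl hhead']
    have hinit : (([] : List String), [first] ++ rest.takeWhile p,
        PySem.Str.len first + 1 + pvSumLen (rest.takeWhile p))
        = (([] : List String), first :: rest.takeWhile p, pvSumLen (first :: rest.takeWhile p)) := by
      simp [pvSumLen]
    rw [hinit]
    -- A's trailing `if current_chunk:` is always taken
    have hcur : ((pvHSecs (rest.dropWhile p)).foldl pvPackStep
        ([], first :: rest.takeWhile p, pvSumLen (first :: rest.takeWhile p))).2.1 ≠ [] := by
      apply pvPack_ne
      · simp
      · exact pvHSecs_ne _ _ le_rfl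
    rw [if_pos hcur]
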